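-- pv_equiv track=rewrite | github.com/MorozovP/algorithms | Sprint 11 Base algo (Project)/b_typing_trainer.py | typing_trainer
-- ===== SOURCE A (Python) =====
-- NUMBER_OF_PLAYERS = 2
--
-- def typing_trainer(k: int, digits: str) -> int:
--     nums_dict: dict = {}
--     for num in digits:
--         nums_dict[num] = nums_dict.get(num, 0) + 1
--     result: int = 0
--     for num in nums_dict.values():
--         if num <= k * NUMBER_OF_PLAYERS:
--             result += 1
--     return result
-- ===== SOURCE B (Python) =====
-- NUMBER_OF_PLAYERS = 2
--
-- def typing_trainer(k: int, digits: str) -> int: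
--     # Sort so equal characters become adjacent, then scan runs of equal
--     # characters; each run's length is that character's frequency.
--     s = sorted(digits)
--     n = len(s)
--     result = 0
--     i = 0
--     while i < n:
--         j = i + 1
--         while j < n and s[j] == s[i]:
--             j += 1
--         if j - i <= k * NUMBER_OF_PLAYERS:
--             result += 1
--         i = j
--     return result
-- ===== Notes on version B (the rewrite author's own statement) =====
-- stated objective: alternative
-- what changed: Replaced the frequency dictionary plus a pass over its values by sorting the string and scanning runs of adjacent equal characters, counting runs whose length is <= k*2.
import Mathlib
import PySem

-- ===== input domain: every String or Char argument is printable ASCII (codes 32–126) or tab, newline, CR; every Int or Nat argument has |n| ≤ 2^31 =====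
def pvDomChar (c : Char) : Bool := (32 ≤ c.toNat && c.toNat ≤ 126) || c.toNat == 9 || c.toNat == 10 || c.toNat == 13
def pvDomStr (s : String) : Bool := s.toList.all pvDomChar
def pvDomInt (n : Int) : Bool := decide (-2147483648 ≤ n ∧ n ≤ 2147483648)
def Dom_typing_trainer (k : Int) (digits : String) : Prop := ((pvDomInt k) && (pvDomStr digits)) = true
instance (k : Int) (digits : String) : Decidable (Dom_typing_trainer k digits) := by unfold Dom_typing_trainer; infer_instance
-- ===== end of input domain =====

-- B sorts the string and scans runs of adjacent equal characters instead of
-- building a frequency dictionary; a different (sort-and-group) algorithm, not faster.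

-- ===== PORT A =====
def typing_trainer (k : Int) (digits : String) : Int :=
  let nums_dict : PySem.Dict Char Int :=
    digits.toList.foldl (fun d num => d.insert num (d.getD num 0 + 1)) PySem.Dict.empty
  nums_dict.values.foldl (fun result num => if num ≤ k * 2 then result + 1 else result) 0

-- ===== PORT B =====
-- the inner while loop: the run of characters equal to s[i] is the takeWhile
-- prefix, and the scan resumes at its end (the dropWhile suffix)
def ttRuns (m : Int) : List Char → Int
  | [] => 0
  | h :: t =>
    (if ((1 + (t.takeWhile (fun c => c == h)).length : Int) ≤ m) then 1 else 0)
      + ttRuns m (t.dropWhile (fun c => c == h))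
termination_by l => l.length
decreasing_by simpa using Nat.lt_succ_of_le (List.length_dropWhile_le _ _)

def typing_trainer_alt (k : Int) (digits : String) : Int :=
  ttRuns (k * 2) (PySem.List.sorted digits.toList (fun c => c) false)

-- ===== PRECONDITION & SPEC =====
def Spec_typing_trainer (k : Int) (digits : String) (out : Int) : Prop := out = typing_trainer_alt k digits
instance (k : Int) (digits : String) (out : Int) : Decidable (Spec_typing_trainer k digits out) := by unfold Spec_typing_trainer; infer_instance

-- ===== CLAIM (what is proved, stated in full; the proofs are below) =====
def Claim_equal_typing_trainer : Prop := ∀ (k : Int) (digits : String), Dom_typing_trainer k digits → Spec_typing_trainer k digits (typing_trainer k digits)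

-- ===== LEMMAS AND PROOFS =====


-- In a ≤-sorted list each run of equal characters is one distinct character
-- with its full frequency: the run count equals a count over distinct elements.
theorem ttRuns_sorted (m : Int) : ∀ (s : List Char), s.Pairwise (· ≤ ·) →
    ttRuns m s = ((PySem.List.dedup s).countP (fun c => decide ((s.count c : Int) ≤ m)) : Int) := by
  intro s
  induction s using ttRuns.induct with
  | case1 => intro _; simp [ttRuns, PySem.List.dedup, PySem.Set.ofList]
  | case2 h t ih =>
    intro hp
    have hall : ∀ c ∈ t, h ≤ c := (List.pairwise_cons.mp hp).1
    have hpt : t.Pairwise (· ≤ ·) := (List.pairwise_cons.mp hp).2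
    have hp2 : (t.dropWhile (fun c => c == h)).Pairwise (· ≤ ·) :=
      hpt.sublist (List.dropWhile_sublist _)
    have ht12 : t.takeWhile (fun c => c == h) ++ t.dropWhile (fun c => c == h) = t :=
      List.takeWhile_append_dropWhile
    have ht1 : ∀ c ∈ t.takeWhile (fun c => c == h), c = h := by
      intro c hc
      have := List.mem_takeWhile_imp hc
      simpa using this
    -- no element of the dropWhile suffix equals h
    have hne : ∀ c ∈ t.dropWhile (fun c => c == h), c ≠ h := by
      intro c hc hch
      obtain ⟨d, r, hd⟩ : ∃ d r, t.dropWhile (fun c => c == h) = d :: r := by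
        cases hdw : t.dropWhile (fun c => c == h) with
        | nil => rw [hdw] at hc; cases hc
        | cons d r => exact ⟨d, r, rfl⟩
      have hdh : ¬ (d == h) = true := by
        have := List.head?_dropWhile_not (fun c => c == h) t
        rw [hd] at this; simpa using this
      have hdh' : d ≠ h := by simpa using hdh
      have hhd : h ≤ d := hall d (by
        have : d ∈ t.dropWhile (fun c => c == h) := by rw [hd]; exact List.mem_cons_self
        exact (List.dropWhile_sublist _).mem this)
      have hdc : d ≤ c := by
        rw [hd] at hc hp2
        rcases List.mem_cons.mp hc with rfl | hcr
        · exact le_rfl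
        · exact (List.pairwise_cons.mp hp2).1 c hcr
      exact hdh' (le_antisymm (hch ▸ hdc) hhd)
    -- counts in h :: t
    have hcount_h : ((h :: t).count h : Int) = 1 + (t.takeWhile (fun c => c == h)).length := by
      have h1 : (t.takeWhile (fun c => c == h)).count h = (t.takeWhile (fun c => c == h)).length :=
        List.count_eq_length.mpr (by intro x hx; exact ((ht1 x hx) ▸ rfl))
      have h2 : (t.dropWhile (fun c => c == h)).count h = 0 :=
        List.count_eq_zero.mpr (by intro hmem; exact hne h hmem rfl)
      have : t.count h = (t.takeWhile (fun c => c == h)).length := by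
        conv_lhs => rw [← ht12]
        rw [List.count_append, h1, h2]; omega
      rw [List.count_cons_self, this]; push_cast; ring
    have hcount_t2 : ∀ c ∈ t.dropWhile (fun c => c == h),
        (h :: t).count c = (t.dropWhile (fun c => c == h)).count c := by
      intro c hc
      have hch : c ≠ h := hne c hc
      have h1 : (t.takeWhile (fun c => c == h)).count c = 0 :=
        List.count_eq_zero.mpr (by intro hmem; exact hch (ht1 c hmem))
      have hc0 : List.count c (h :: t) = List.count c t := by
        simp [Ne.symm hch]
      rw [hc0]
      conv_lhs => rw [← ht12]
      rw [List.count_append, h1]; omega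
    -- dedup (h :: t) is a permutation of h :: dedup (dropWhile suffix)
    have hmem_t : ∀ a, a ∈ h :: t ↔ a = h ∨ a ∈ t.dropWhile (fun c => c == h) := by
      intro a
      rw [List.mem_cons]
      constructor
      · rintro (rfl | ha)
        · exact Or.inl rfl
        · rw [← ht12] at ha
          rcases List.mem_append.mp ha with h1 | h2
          · exact Or.inl (ht1 a h1)
          · exact Or.inr h2
      · rintro (rfl | h2)
        · exact Or.inl rfl
        · exact Or.inr ((List.dropWhile_sublist _).mem h2)
    have hperm : (PySem.List.dedup (h :: t)).Perm
        (h :: PySem.List.dedup (t.dropWhile (fun c => c == h))) := by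
      apply (List.perm_ext_iff_of_nodup (PySem.List.nodup_dedup _) ?_).mpr
      · intro a
        rw [PySem.List.mem_dedup, hmem_t a, List.mem_cons, PySem.List.mem_dedup]
      · exact List.nodup_cons.mpr ⟨fun hm => hne h ((PySem.List.mem_dedup _ _).mp hm) rfl,
          PySem.List.nodup_dedup _⟩
    rw [ttRuns, hperm.countP_eq]
    rw [List.countP_cons]
    have hpred : ∀ c ∈ PySem.List.dedup (t.dropWhile (fun c => c == h)),
        (decide (((h :: t).count c : Int) ≤ m)) = true ↔
          (decide (((t.dropWhile (fun c => c == h)).count c : Int) ≤ m)) = true := by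
      intro c hc
      rw [hcount_t2 c ((PySem.List.mem_dedup _ _).mp hc)]
    rw [List.countP_congr hpred, ih hp2]
    simp only [hcount_h]
    by_cases hm : (1 + ((t.takeWhile (fun c => c == h)).length : Int)) ≤ m <;>
      simp [hm] <;> omega

-- ===== VERDICT (by name: the statement is the Claim_ definition above) =====
theorem typing_trainer_spec : Claim_equal_typing_trainer := by
  intro k digits _
  unfold Spec_typing_trainer typing_trainer typing_trainer_alt
  rw [PySem.Dict.foldl_insert_getD_add_one_eq_counter]
  simp only [PySem.Dict.values, PySem.Dict.items_counter, List.map_map,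
    PySem.List.foldl_ite_add_one, List.countP_map]
  have hsp : (PySem.List.sorted digits.toList (fun c => c) false).Pairwise (· ≤ ·) := by
    have := PySem.List.sorted_pairwise digits.toList (fun c => c)
    simpa using this
  rw [ttRuns_sorted _ _ hsp]
  have hperm : (PySem.List.dedup (PySem.List.sorted digits.toList (fun c => c) false)).Perm
      (PySem.Set.ofList digits.toList) := by
    apply (List.perm_ext_iff_of_nodup (PySem.List.nodup_dedup _) (PySem.Set.nodup_ofList _)).mpr
    intro a
    rw [PySem.List.mem_dedup, PySem.List.mem_sorted, PySem.Set.mem_ofList]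
  rw [hperm.countP_eq, zero_add]
  congr 1
  apply List.countP_congr
  intro c _
  rw [(PySem.List.sorted_perm digits.toList (fun c => c) false).count_eq c]
  simp [Function.comp]
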